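-- pv_equiv track=rewrite | github.com/subu0106/Stock-Market-Dashboard | app.py | get_ticker_suggestions
-- ===== SOURCE A (Python) =====
-- POPULAR_TICKERS = [
--
--     'AAPL', 'GOOGL', 'GOOG', 'AMZN', 'MSFT', 'NVDA', 'META', 'NFLX', 'ADBE', 'CRM',
--     'ORCL', 'IBM', 'INTC', 'AMD', 'QCOM', 'AVGO', 'CSCO', 'PYPL', 'SQ', 'UBER',
--     'LYFT', 'SNAP', 'TWTR', 'ZOOM', 'TSLA', 'F', 'GM', 'NIO', 'NVDA'
-- ]
--
-- def get_ticker_suggestions(search_term):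
--     """Get ticker suggestions based on search term"""
--     if not search_term:
--         return POPULAR_TICKERS[:10]  # Return top 10 popular tickers
--
--     search_term = search_term.upper()
--     suggestions = []
--
--     # Exact matches first
--     for ticker in POPULAR_TICKERS:
--         if ticker == search_term:
--             suggestions.append(ticker)
--
--     # Starts with matches
--     for ticker in POPULAR_TICKERS:
--         if ticker.startswith(search_term) and ticker not in suggestions:
--             suggestions.append(ticker)
--
--     # Contains matches
--     for ticker in POPULAR_TICKERS:
--         if search_term in ticker and ticker not in suggestions:
--             suggestions.append(ticker)
--
--     return suggestions[:10]  # Return top 10 suggestions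
-- ===== SOURCE B (Python) =====
-- POPULAR_TICKERS = [
--
--     'AAPL', 'GOOGL', 'GOOG', 'AMZN', 'MSFT', 'NVDA', 'META', 'NFLX', 'ADBE', 'CRM',
--     'ORCL', 'IBM', 'INTC', 'AMD', 'QCOM', 'AVGO', 'CSCO', 'PYPL', 'SQ', 'UBER',
--     'LYFT', 'SNAP', 'TWTR', 'ZOOM', 'TSLA', 'F', 'GM', 'NIO', 'NVDA'
-- ]
--
-- def get_ticker_suggestions(search_term):
--     """Get ticker suggestions based on search term (single pass over POPULAR_TICKERS)."""
--     if not search_term: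
--         return POPULAR_TICKERS[:10]
--
--     search_term = search_term.upper()
--     exact, prefix, contains = [], [], []
--     seen = set()
--     for ticker in POPULAR_TICKERS:
--         if ticker == search_term:
--             exact.append(ticker)  # duplicates kept, as repeated exact scans would
--         elif ticker.startswith(search_term):
--             if ticker not in seen:
--                 seen.add(ticker)
--                 prefix.append(ticker)
--         elif search_term in ticker:
--             if ticker not in seen:
--                 seen.add(ticker)
--                 contains.append(ticker)
--     return (exact + prefix + contains)[:10]
-- ===== Notes on version B (the rewrite author's own statement) =====
-- stated objective: alternative
-- what changed: Replaces A's three sequential scans with list-membership tests against the growing suggestions list by a single pass that classifies each ticker into exact/prefix/contains buckets via an if/elif chain with a seen-set, then concatenates the buckets.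
import Mathlib
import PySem

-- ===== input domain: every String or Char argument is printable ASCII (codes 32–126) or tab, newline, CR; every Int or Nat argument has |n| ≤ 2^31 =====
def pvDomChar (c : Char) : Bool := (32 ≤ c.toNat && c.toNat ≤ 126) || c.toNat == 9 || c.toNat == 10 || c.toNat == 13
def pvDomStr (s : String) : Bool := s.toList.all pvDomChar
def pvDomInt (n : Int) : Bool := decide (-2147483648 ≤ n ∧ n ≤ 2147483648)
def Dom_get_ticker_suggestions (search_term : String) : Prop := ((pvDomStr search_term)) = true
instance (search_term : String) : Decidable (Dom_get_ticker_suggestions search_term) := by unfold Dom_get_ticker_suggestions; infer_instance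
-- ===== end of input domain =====

-- B replaces A's three sequential scans (each probing the growing suggestions list) by one
-- classifying pass with three buckets and a seen-set; equal return value, no side effects.

-- ===== PORT A =====
def POPULAR_TICKERS : List String :=
  ["AAPL", "GOOGL", "GOOG", "AMZN", "MSFT", "NVDA", "META", "NFLX", "ADBE", "CRM",
   "ORCL", "IBM", "INTC", "AMD", "QCOM", "AVGO", "CSCO", "PYPL", "SQ", "UBER",
   "LYFT", "SNAP", "TWTR", "ZOOM", "TSLA", "F", "GM", "NIO", "NVDA"]

def get_ticker_suggestions (search_term : String) : List String :=
  if search_term == "" then PySem.List.slice POPULAR_TICKERS none (some 10)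
  else
    let S := PySem.Str.upper search_term
    -- Exact matches first
    let s1 := POPULAR_TICKERS.foldl (fun acc t => if t == S then acc ++ [t] else acc) []
    -- Starts with matches
    let s2 := POPULAR_TICKERS.foldl
      (fun acc t => if PySem.Str.startswith t S && !acc.contains t then acc ++ [t] else acc) s1
    -- Contains matches
    let s3 := POPULAR_TICKERS.foldl
      (fun acc t => if PySem.Str.isIn S t && !acc.contains t then acc ++ [t] else acc) s2
    PySem.List.slice s3 none (some 10)

-- ===== PORT B =====
def get_ticker_suggestions_alt (search_term : String) : List String :=
  if search_term == "" then PySem.List.slice POPULAR_TICKERS none (some 10)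
  else
    let S := PySem.Str.upper search_term
    let st := POPULAR_TICKERS.foldl
      (fun (st : List String × List String × List String × PySem.Set String) t =>
        if t == S then (st.1 ++ [t], st.2.1, st.2.2.1, st.2.2.2)
        else if PySem.Str.startswith t S then
          (if !(PySem.Set.contains st.2.2.2 t)
           then (st.1, st.2.1 ++ [t], st.2.2.1, PySem.Set.add st.2.2.2 t) else st)
        else if PySem.Str.isIn S t then
          (if !(PySem.Set.contains st.2.2.2 t)
           then (st.1, st.2.1, st.2.2.1 ++ [t], PySem.Set.add st.2.2.2 t) else st)
        else st)
      ([], [], [], PySem.Set.empty)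
    PySem.List.slice (st.1 ++ st.2.1 ++ st.2.2.1) none (some 10)

-- ===== PRECONDITION & SPEC =====
def Spec_get_ticker_suggestions (search_term : String) (out : List String) : Prop := out = get_ticker_suggestions_alt search_term
instance (search_term : String) (out : List String) : Decidable (Spec_get_ticker_suggestions search_term out) := by unfold Spec_get_ticker_suggestions; infer_instance

-- ===== CLAIM (what is proved, stated in full; the proofs are below) =====
def Claim_equal_get_ticker_suggestions : Prop := ∀ (search_term : String), Dom_get_ticker_suggestions search_term → Spec_get_ticker_suggestions search_term (get_ticker_suggestions search_term)

-- ===== LEMMAS AND PROOFS =====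

-- 'add t if q t and t not yet collected', threading the collected list as the seen list
def ddOne (q : String → Bool) : List String → List String → List String
  | _, [] => []
  | seen, t :: ts =>
      if q t && !seen.contains t then t :: ddOne q (seen ++ [t]) ts else ddOne q seen ts

theorem foldl_filter_q (q : String → Bool) (l acc : List String) :
    l.foldl (fun acc t => if q t then acc ++ [t] else acc) acc = acc ++ l.filter q := by
  induction l generalizing acc with
  | nil => simp
  | cons t ts ih =>
    simp only [List.foldl_cons, List.filter_cons]
    by_cases h : q t
    · simp [h, ih]
    · simp [h, ih]

theorem foldl_ddOne (q : String → Bool) (l acc : List String) :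
    l.foldl (fun acc t => if q t && !acc.contains t then acc ++ [t] else acc) acc
      = acc ++ ddOne q acc l := by
  induction l generalizing acc with
  | nil => simp [ddOne]
  | cons t ts ih =>
    by_cases h : q t && !acc.contains t
    · rw [List.foldl_cons, if_pos h, ih]
      simp only [ddOne]
      rw [if_pos h]
      simp
    · rw [List.foldl_cons, if_neg h, ih]
      simp only [ddOne]
      rw [if_neg h]

theorem ddOne_congr (q1 q2 : String → Bool) :
    ∀ (l s1 s2 : List String),
      (∀ t ∈ l, (q1 t && !s1.contains t) = (q2 t && !s2.contains t)) →
      ddOne q1 s1 l = ddOne q2 s2 l := by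
  intro l
  induction l with
  | nil => intro _ _ _; simp [ddOne]
  | cons t ts ih =>
    intro s1 s2 h
    have ht := h t (by simp)
    simp only [ddOne, ← ht]
    by_cases hc : q1 t && !s1.contains t
    · rw [if_pos hc, if_pos hc]
      congr 1
      apply ih
      intro u hu
      have hu1 := h u (by simp [hu])
      rw [List.contains_append, List.contains_append]
      have hsingle : ([t].contains u) = (u == t) := by
        simp only [List.contains_cons, List.contains_nil, Bool.or_false]
      rw [hsingle]
      cases he : (u == t)
      · simp only [Bool.or_false, hu1]
      · simp
    · rw [if_neg hc, if_neg hc]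
      exact ih s1 s2 (fun u hu => h u (by simp [hu]))

theorem mem_ddOne_sound (q : String → Bool) :
    ∀ (l seen : List String) (t : String), t ∈ ddOne q seen l → q t = true ∧ t ∈ l := by
  intro l
  induction l with
  | nil => intro _ _ h; simp [ddOne] at h
  | cons x xs ih =>
    intro seen t h
    simp only [ddOne] at h
    by_cases hc : q x && !seen.contains x
    · rw [if_pos hc] at h
      rcases List.mem_cons.mp h with rfl | h2
      · exact ⟨(Bool.and_eq_true_iff.mp hc).1, by simp⟩
      · have := ih _ _ h2
        exact ⟨this.1, by simp [this.2]⟩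
    · rw [if_neg hc] at h
      have := ih _ _ h
      exact ⟨this.1, by simp [this.2]⟩

theorem not_mem_ddOne (q : String → Bool) :
    ∀ (l seen : List String) (t : String), seen.contains t = true → t ∉ ddOne q seen l := by
  intro l
  induction l with
  | nil => intro _ _ _ _; simp [ddOne] at *
  | cons x xs ih =>
    intro seen t hs
    simp only [ddOne]
    by_cases hc : q x && !seen.contains x
    · rw [if_pos hc]
      intro h
      rcases List.mem_cons.mp h with rfl | h2
      · have h2 := (Bool.and_eq_true_iff.mp hc).2
        rw [hs] at h2
        simp at h2
      · refine ih (seen ++ [x]) t ?_ h2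
        rw [List.contains_append, hs, Bool.true_or]
    · rw [if_neg hc]
      exact ih seen t hs

theorem mem_ddOne_complete (q : String → Bool) :
    ∀ (l seen : List String) (t : String),
      q t = true → seen.contains t = false → t ∈ l → t ∈ ddOne q seen l := by
  intro l
  induction l with
  | nil => intro _ _ _ _ h; simp at h
  | cons x xs ih =>
    intro seen t hq hs hl
    simp only [ddOne]
    by_cases hc : q x && !seen.contains x
    · rw [if_pos hc]
      by_cases he : t = x
      · simp [he]
      · rcases List.mem_cons.mp hl with rfl | h2
        · exact absurd rfl he
        · refine List.mem_cons_of_mem _ (ih (seen ++ [x]) t hq ?_ h2)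
          rw [List.contains_append, hs, Bool.false_or]
          simp only [List.contains_cons, List.contains_nil, Bool.or_false]
          exact beq_eq_false_iff_ne.mpr he
    · rw [if_neg hc]
      rcases List.mem_cons.mp hl with rfl | h2
      · rw [hq, hs] at hc
        simp at hc
      · exact ih seen t hq hs h2

-- membership characterization, as Bool contains, for elements of the scanned list
theorem contains_ddOne (q : String → Bool) (l seen : List String) (t : String)
    (hl : t ∈ l) :
    (ddOne q seen l).contains t = (q t && !seen.contains t) := by
  by_cases hq : q t = true
  · by_cases hs : seen.contains t = true
    · rw [hq, hs]
      have hnm : t ∉ ddOne q seen l := not_mem_ddOne q l seen t hs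
      simp [List.contains_iff_mem, hnm]
    · have hs' : seen.contains t = false := by simpa using hs
      rw [hq, hs']
      have hm : t ∈ ddOne q seen l := mem_ddOne_complete q l seen t hq hs' hl
      simp [List.contains_iff_mem, hm]
  · have hq' : q t = false := by simpa using hq
    rw [hq']
    have hnm : t ∉ ddOne q seen l := fun h => hq ((mem_ddOne_sound q l seen t h).1)
    simp [List.contains_iff_mem, hnm]

theorem contains_filter_eq (S t : String) (P : List String) (ht : t ∈ P) :
    (P.filter (fun x => x == S)).contains t = (t == S) := by
  by_cases h : t = S
  · have hm : t ∈ P.filter (fun x => x == S) := List.mem_filter.mpr ⟨ht, by simp [h]⟩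
    have hb : (t == S) = true := by simp [h]
    rw [hb]
    simp [List.contains_iff_mem, hm]
  · have hb : (t == S) = false := beq_eq_false_iff_ne.mpr h
    rw [hb]
    have hnm : t ∉ P.filter (fun x => x == S) := by
      intro hm
      exact h (by simpa using (List.mem_filter.mp hm).2)
    exact Bool.eq_false_iff.mpr (fun hcT => hnm (List.contains_iff_mem.mp hcT))

theorem eq_imp_startswith (S t : String) (h : (t == S) = true) :
    PySem.Str.startswith t S = true := by
  have : t = S := by simpa using h
  subst this
  rw [PySem.Str.startswith_eq]
  exact (PySem.Chars.startswith_iff _ _).mpr (List.prefix_refl _)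

-- the one-pass fold of B, characterized bucket by bucket
def bstep (S : String) (st : List String × List String × List String × PySem.Set String)
    (t : String) : List String × List String × List String × PySem.Set String :=
  if t == S then (st.1 ++ [t], st.2.1, st.2.2.1, st.2.2.2)
  else if PySem.Str.startswith t S then
    (if !(PySem.Set.contains st.2.2.2 t)
     then (st.1, st.2.1 ++ [t], st.2.2.1, PySem.Set.add st.2.2.2 t) else st)
  else if PySem.Str.isIn S t then
    (if !(PySem.Set.contains st.2.2.2 t)
     then (st.1, st.2.1, st.2.2.1 ++ [t], PySem.Set.add st.2.2.2 t) else st)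
  else st

theorem bfold_char (S : String) :
    ∀ (l e p c : List String) (seen : PySem.Set String),
      (∀ t : String, PySem.Set.contains seen t = (p.contains t || c.contains t)) →
      (∀ t ∈ p, PySem.Str.startswith t S = true ∧ (t == S) = false) →
      (∀ t ∈ c, PySem.Str.isIn S t = true ∧ PySem.Str.startswith t S = false) →
      ((l.foldl
          (fun (st : List String × List String × List String × PySem.Set String) t =>
            if t == S then (st.1 ++ [t], st.2.1, st.2.2.1, st.2.2.2)
            else if PySem.Str.startswith t S then
              (if !(PySem.Set.contains st.2.2.2 t)
               then (st.1, st.2.1 ++ [t], st.2.2.1, PySem.Set.add st.2.2.2 t) else st)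
            else if PySem.Str.isIn S t then
              (if !(PySem.Set.contains st.2.2.2 t)
               then (st.1, st.2.1, st.2.2.1 ++ [t], PySem.Set.add st.2.2.2 t) else st)
            else st)
          (e, p, c, seen)).1 = e ++ l.filter (fun t => t == S)
       ∧ (l.foldl
          (fun (st : List String × List String × List String × PySem.Set String) t =>
            if t == S then (st.1 ++ [t], st.2.1, st.2.2.1, st.2.2.2)
            else if PySem.Str.startswith t S then
              (if !(PySem.Set.contains st.2.2.2 t)
               then (st.1, st.2.1 ++ [t], st.2.2.1, PySem.Set.add st.2.2.2 t) else st)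
            else if PySem.Str.isIn S t then
              (if !(PySem.Set.contains st.2.2.2 t)
               then (st.1, st.2.1, st.2.2.1 ++ [t], PySem.Set.add st.2.2.2 t) else st)
            else st)
          (e, p, c, seen)).2.1
           = p ++ ddOne (fun t => PySem.Str.startswith t S && !(t == S)) p l
       ∧ (l.foldl
          (fun (st : List String × List String × List String × PySem.Set String) t =>
            if t == S then (st.1 ++ [t], st.2.1, st.2.2.1, st.2.2.2)
            else if PySem.Str.startswith t S then
              (if !(PySem.Set.contains st.2.2.2 t)
               then (st.1, st.2.1 ++ [t], st.2.2.1, PySem.Set.add st.2.2.2 t) else st)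
            else if PySem.Str.isIn S t then
              (if !(PySem.Set.contains st.2.2.2 t)
               then (st.1, st.2.1, st.2.2.1 ++ [t], PySem.Set.add st.2.2.2 t) else st)
            else st)
          (e, p, c, seen)).2.2.1
           = c ++ ddOne (fun t => PySem.Str.isIn S t && !(PySem.Str.startswith t S)) c l) := by
  have hL : (fun (st : List String × List String × List String × PySem.Set String) t =>
            if t == S then (st.1 ++ [t], st.2.1, st.2.2.1, st.2.2.2)
            else if PySem.Str.startswith t S then
              (if !(PySem.Set.contains st.2.2.2 t)
               then (st.1, st.2.1 ++ [t], st.2.2.1, PySem.Set.add st.2.2.2 t) else st)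
            else if PySem.Str.isIn S t then
              (if !(PySem.Set.contains st.2.2.2 t)
               then (st.1, st.2.1, st.2.2.1 ++ [t], PySem.Set.add st.2.2.2 t) else st)
            else st) = bstep S := rfl
  intro l
  simp only [hL]
  induction l with
  | nil => intro e p c seen _ _ _; simp [ddOne]
  | cons t ts ih =>
    intro e p c seen hseen hp hc
    rw [List.foldl_cons]
    have hseenL : ∀ u : String, List.contains seen u = (List.contains p u || List.contains c u) := by
      intro u
      have := hseen u
      simpa using this
    by_cases hE : (t == S) = true
    · have hpp : PySem.Str.startswith t S = true := eq_imp_startswith S t hE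
      have hstep : bstep S (e, p, c, seen) t = (e ++ [t], p, c, seen) := by
        simp only [bstep, hE]; simp
      rw [hstep]
      obtain ⟨i1, i2, i3⟩ := ih (e ++ [t]) p c seen hseen hp hc
      refine ⟨?_, ?_, ?_⟩
      · rw [i1, List.filter_cons]
        simp [hE]
      · rw [i2]
        congr 1
        simp only [ddOne]
        rw [if_neg (by simp only [hE]; simp)]
      · rw [i3]
        congr 1
        simp only [ddOne]
        rw [if_neg (by simp only [hpp]; simp)]
    · have hE' : (t == S) = false := by simpa using hE
      by_cases hP : PySem.Str.startswith t S = true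
      · -- prefix branch
        have hct : c.contains t = false := by
          cases hcc : c.contains t
          · rfl
          · have := (hc t (List.contains_iff_mem.mp hcc)).2
            rw [hP] at this; cases this
        by_cases hS : List.contains seen t = true
        · -- already collected: state unchanged
          have hpt : p.contains t = true := by
            have := hseenL t
            rw [hS, hct, Bool.or_false] at this
            exact this.symm
          have hstep : bstep S (e, p, c, seen) t = (e, p, c, seen) := by
            simp only [bstep, hE', hP, hS]; simp [List.contains_iff_mem.mp hS]
          rw [hstep]
          obtain ⟨i1, i2, i3⟩ := ih e p c seen hseen hp hc
          refine ⟨?_, ?_, ?_⟩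
          · rw [i1, List.filter_cons]; simp [hE']
          · rw [i2]
            congr 1
            simp only [ddOne]
            rw [if_neg (by simp only [hpt]; simp)]
          · rw [i3]
            congr 1
            simp only [ddOne]
            rw [if_neg (by simp only [hP]; simp)]
        · -- new: goes to the prefix bucket
          have hS' : List.contains seen t = false := by simpa using hS
          have hSm : t ∉ seen := fun hm => by rw [List.contains_iff_mem.mpr hm] at hS'; cases hS'
          have hpt : p.contains t = false := by
            have := hseenL t
            rw [hS', hct, Bool.or_false] at this
            exact this.symm
          have hadd : PySem.Set.add seen t = seen ++ [t] := by
            simp [PySem.Set.add, hS', hSm]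
          have hstep : bstep S (e, p, c, seen) t
              = (e, p ++ [t], c, PySem.Set.add seen t) := by
            simp only [bstep, hE', hP, hS', hSm]; simp [hSm]; all_goals (intro hm; have h2 : List.contains seen t = true := by simpa using hm; rw [hS'] at h2; cases h2)
          rw [hstep]
          have hseen' : ∀ u : String,
              PySem.Set.contains (PySem.Set.add seen t) u
                = ((p ++ [t]).contains u || c.contains u) := by
            intro u
            rw [hadd]
            simp only [PySem.Set.contains_eq_listContains]
            rw [List.contains_append, List.contains_append, hseenL u]
            cases hpu : p.contains u <;> cases hcu : c.contains u <;> simp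
          have hp' : ∀ u ∈ p ++ [t],
              PySem.Str.startswith u S = true ∧ (u == S) = false := by
            intro u hu
            rcases List.mem_append.mp hu with h1 | h1
            · exact hp u h1
            · have : u = t := by simpa using h1
              subst this; exact ⟨hP, hE'⟩
          obtain ⟨i1, i2, i3⟩ := ih e (p ++ [t]) c (PySem.Set.add seen t) hseen' hp' hc
          refine ⟨?_, ?_, ?_⟩
          · rw [i1, List.filter_cons]; simp [hE']
          · rw [i2]
            simp only [ddOne]
            rw [if_pos (by simp only [hP, hE', hpt]; simp)]
            simp
          · rw [i3]
            congr 1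
            simp only [ddOne]
            rw [if_neg (by simp only [hP]; simp)]
      · -- not a prefix match
        have hP' : PySem.Str.startswith t S = false := by simpa using hP
        have hpt : p.contains t = false := by
          cases hpu : p.contains t
          · rfl
          · have := (hp t (List.contains_iff_mem.mp hpu)).1
            rw [hP'] at this; cases this
        by_cases hC : PySem.Str.isIn S t = true
        · -- contains branch
          by_cases hS : List.contains seen t = true
          · have hct : c.contains t = true := by
              have := hseenL t
              rw [hS, hpt, Bool.false_or] at this
              exact this.symm
            have hstep : bstep S (e, p, c, seen) t = (e, p, c, seen) := by
              simp only [bstep, hE', hP', hC, hS]; simp [List.contains_iff_mem.mp hS]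
            rw [hstep]
            obtain ⟨i1, i2, i3⟩ := ih e p c seen hseen hp hc
            refine ⟨?_, ?_, ?_⟩
            · rw [i1, List.filter_cons]; simp [hE']
            · rw [i2]
              congr 1
              simp only [ddOne]
              rw [if_neg (by simp only [hP']; simp)]
            · rw [i3]
              congr 1
              simp only [ddOne]
              rw [if_neg (by simp only [hct]; simp)]
          · have hS' : List.contains seen t = false := by simpa using hS
            have hSm : t ∉ seen := fun hm => by rw [List.contains_iff_mem.mpr hm] at hS'; cases hS'
            have hct : c.contains t = false := by
              have := hseenL t
              rw [hS', hpt, Bool.false_or] at this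
              exact this.symm
            have hadd : PySem.Set.add seen t = seen ++ [t] := by
              simp [PySem.Set.add, hS', hSm]
            have hstep : bstep S (e, p, c, seen) t
                = (e, p, c ++ [t], PySem.Set.add seen t) := by
              simp only [bstep, hE', hP', hC, hS', hSm]; simp [hSm]; all_goals (intro hm; have h2 : List.contains seen t = true := by simpa using hm; rw [hS'] at h2; cases h2)
            rw [hstep]
            have hseen' : ∀ u : String,
                PySem.Set.contains (PySem.Set.add seen t) u
                  = (p.contains u || (c ++ [t]).contains u) := by
              intro u
              rw [hadd]
              simp only [PySem.Set.contains_eq_listContains]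
              rw [List.contains_append, List.contains_append, hseenL u]
              cases hpu : p.contains u <;> cases hcu : c.contains u <;> simp
            have hc' : ∀ u ∈ c ++ [t],
                PySem.Str.isIn S u = true ∧ PySem.Str.startswith u S = false := by
              intro u hu
              rcases List.mem_append.mp hu with h1 | h1
              · exact hc u h1
              · have : u = t := by simpa using h1
                subst this; exact ⟨hC, hP'⟩
            obtain ⟨i1, i2, i3⟩ := ih e p (c ++ [t]) (PySem.Set.add seen t) hseen' hp hc'
            refine ⟨?_, ?_, ?_⟩
            · rw [i1, List.filter_cons]; simp [hE']
            · rw [i2]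
              congr 1
              simp only [ddOne]
              rw [if_neg (by simp only [hP']; simp)]
            · rw [i3]
              simp only [ddOne]
              rw [if_pos (by simp only [hC, hP', hct]; simp)]
              simp
        · -- no match at all
          have hC' : PySem.Str.isIn S t = false := by simpa using hC
          have hstep : bstep S (e, p, c, seen) t = (e, p, c, seen) := by
            simp only [bstep, hE', hP', hC']; simp
          rw [hstep]
          obtain ⟨i1, i2, i3⟩ := ih e p c seen hseen hp hc
          refine ⟨?_, ?_, ?_⟩
          · rw [i1, List.filter_cons]; simp [hE']
          · rw [i2]
            congr 1
            simp only [ddOne]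
            rw [if_neg (by simp only [hP']; simp)]
          · rw [i3]
            congr 1
            simp only [ddOne]
            rw [if_neg (by simp only [hC']; simp)]

-- ===== VERDICT (by name: the statement is the Claim_ definition above) =====
theorem get_ticker_suggestions_spec : Claim_equal_get_ticker_suggestions := by
  intro s _
  unfold Spec_get_ticker_suggestions get_ticker_suggestions get_ticker_suggestions_alt
  by_cases h0 : s == ""
  · rw [if_pos h0, if_pos h0]
  · rw [if_neg h0, if_neg h0]
    simp only []
    rw [foldl_filter_q (fun t => t == PySem.Str.upper s) POPULAR_TICKERS []]
    rw [foldl_ddOne (fun t => PySem.Str.startswith t (PySem.Str.upper s)) POPULAR_TICKERS]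
    rw [foldl_ddOne (fun t => PySem.Str.isIn (PySem.Str.upper s) t) POPULAR_TICKERS]
    obtain ⟨i1, i2, i3⟩ := bfold_char (PySem.Str.upper s) POPULAR_TICKERS [] [] []
      PySem.Set.empty (by intro t; simp [PySem.Set.empty]) (by intro t h; cases h)
      (by intro t h; cases h)
    rw [i1, i2, i3]
    simp only [List.nil_append]
    have hdd2 : ddOne (fun t => PySem.Str.startswith t (PySem.Str.upper s))
        (POPULAR_TICKERS.filter (fun t => t == PySem.Str.upper s)) POPULAR_TICKERS
        = ddOne (fun t => PySem.Str.startswith t (PySem.Str.upper s) && !(t == PySem.Str.upper s))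
            [] POPULAR_TICKERS := by
      apply ddOne_congr
      intro t ht
      rw [contains_filter_eq (PySem.Str.upper s) t POPULAR_TICKERS ht]
      simp [Bool.and_assoc]
    have hdd3 : ddOne (fun t => PySem.Str.isIn (PySem.Str.upper s) t)
        (POPULAR_TICKERS.filter (fun t => t == PySem.Str.upper s)
          ++ ddOne (fun t => PySem.Str.startswith t (PySem.Str.upper s))
               (POPULAR_TICKERS.filter (fun t => t == PySem.Str.upper s)) POPULAR_TICKERS)
        POPULAR_TICKERS
        = ddOne (fun t => PySem.Str.isIn (PySem.Str.upper s) t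
            && !(PySem.Str.startswith t (PySem.Str.upper s))) [] POPULAR_TICKERS := by
      apply ddOne_congr
      intro t ht
      rw [List.contains_append,
        contains_filter_eq (PySem.Str.upper s) t POPULAR_TICKERS ht,
        contains_ddOne (fun t => PySem.Str.startswith t (PySem.Str.upper s))
          POPULAR_TICKERS _ t ht,
        contains_filter_eq (PySem.Str.upper s) t POPULAR_TICKERS ht]
      have hx : ((t == PySem.Str.upper s)
          || (PySem.Str.startswith t (PySem.Str.upper s) && !(t == PySem.Str.upper s)))
          = PySem.Str.startswith t (PySem.Str.upper s) := by
        cases hE : (t == PySem.Str.upper s)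
        · simp
        · have h2 := eq_imp_startswith (PySem.Str.upper s) t hE
          rw [h2]
          simp
      rw [hx]
      simp [Bool.and_assoc]
    rw [hdd3, hdd2]
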